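-- pv_equiv track=rewrite | github.com/usermaomao/remote_shell_cmd | ssh_remote_tool/demo_fixes.py | normalize_remote_path
-- ===== SOURCE A (Python) =====
-- def normalize_remote_path(path):
--     """Normalize remote path to use forward slashes and handle edge cases"""
--     if not path:
--         return "/"
--
--     # Convert to forward slashes
--     path = path.replace('\\', '/')
--
--     # Ensure it starts with /
--     if not path.startswith('/'):
--         path = '/' + path
--
--     # Remove double slashes
--     while '//' in path:
--         path = path.replace('//', '/')
--
--     # Remove trailing slash unless it's root
--     if len(path) > 1 and path.endswith('/'):
--         path = path.rstrip('/')
--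
--     return path
-- ===== SOURCE B (Python) =====
-- def normalize_remote_path(path):
--     """Normalize remote path to use forward slashes and handle edge cases"""
--     segments = [s for s in path.replace('\\', '/').split('/') if s]
--     return '/' + '/'.join(segments)
-- ===== Notes on version B (the rewrite author's own statement) =====
-- stated objective: idiomatic
-- what changed: Replaces A's fixpoint while-loop of double-slash replacements plus startswith/rstrip fix-ups with a single split-on-separator / filter-empty-segments / join pass.
import Mathlib
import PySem

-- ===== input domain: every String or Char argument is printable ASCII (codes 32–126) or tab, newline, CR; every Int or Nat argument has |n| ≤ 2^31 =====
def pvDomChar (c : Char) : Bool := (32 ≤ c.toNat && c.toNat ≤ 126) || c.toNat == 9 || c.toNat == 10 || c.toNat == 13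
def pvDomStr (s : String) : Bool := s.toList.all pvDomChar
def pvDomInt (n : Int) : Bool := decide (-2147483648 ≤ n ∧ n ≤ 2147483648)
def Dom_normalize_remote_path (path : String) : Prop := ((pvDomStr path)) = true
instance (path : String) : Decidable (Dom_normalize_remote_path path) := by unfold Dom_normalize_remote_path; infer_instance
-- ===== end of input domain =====

-- B replaces A's fixpoint loop of double-slash replacements and the startswith/rstrip fix-ups by one
-- split-on-'/' / filter-empty / join pass (objective: idiomatic; return value only, no mutation).

-- ===== PORT A =====
-- helpers of A's port, over List Char (ported by hand; exact on all inputs):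
-- one left-to-right non-overlapping pass of Python's str.replace('//', '/')
def repDD : List Char → List Char
  | [] => []
  | [c] => [c]
  | a :: b :: t => if a = '/' ∧ b = '/' then '/' :: repDD t else a :: repDD (b :: t)

-- Python's `'//' in path`
def hasDD : List Char → Bool
  | a :: b :: t => (a = '/' && b = '/') || hasDD (b :: t)
  | _ => false

theorem repDD_length_le (l : List Char) : (repDD l).length ≤ l.length := by
  match l with
  | [] => simp [repDD]
  | [c] => simp [repDD]
  | a :: b :: t =>
    simp only [repDD]
    split
    · have := repDD_length_le t; simp; omega
    · have := repDD_length_le (b :: t); simp at this ⊢; omega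

theorem repDD_length_lt (l : List Char) (h : hasDD l = true) : (repDD l).length < l.length := by
  match l with
  | [] => simp [hasDD] at h
  | [c] => simp [hasDD] at h
  | a :: b :: t =>
    simp only [repDD]
    split
    · have := repDD_length_le t; simp; omega
    · rename_i hc
      simp only [hasDD, Bool.or_eq_true, Bool.and_eq_true, decide_eq_true_eq] at h
      rcases h with h | h
      · exact absurd h hc
      · have := repDD_length_lt (b :: t) h; simp at this ⊢; omega

-- Python's `while '//' in path: path = path.replace('//', '/')`
def loopRep (l : List Char) : List Char :=
  if hasDD l then loopRep (repDD l) else l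
termination_by l.length
decreasing_by exact repDD_length_lt l (by assumption)

def normalize_remote_path (path : String) : String :=
  -- if not path: return "/"
  if path = "" then "/" else
  -- path = path.replace('\\', '/')
  let m := path.toList.map (fun c => if c = '\\' then '/' else c)
  -- if not path.startswith('/'): path = '/' + path
  let m1 := if m.head? = some '/' then m else '/' :: m
  -- while '//' in path: path = path.replace('//', '/')
  let r := loopRep m1
  -- if len(path) > 1 and path.endswith('/'): path = path.rstrip('/')
  let r1 := if 1 < r.length ∧ r.getLast? = some '/' then (r.reverse.dropWhile (· = '/')).reverse else r
  String.ofList r1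

-- ===== PORT B =====
-- str.split('/') over List Char (exact: Python split always yields ≥ 1 piece)
def splitSlash : List Char → List (List Char)
  | [] => [[]]
  | c :: t =>
    match splitSlash t with
    | [] => [[]]  -- unreachable: splitSlash never returns []
    | s :: rest => if c = '/' then [] :: s :: rest else (c :: s) :: rest

-- '/'.join over List Char
def joinS : List (List Char) → List Char
  | [] => []
  | [s] => s
  | s :: rest => s ++ '/' :: joinS rest

def normalize_remote_path_alt (path : String) : String :=
  -- segments = [s for s in path.replace('\\', '/').split('/') if s]
  let segs := (splitSlash (path.toList.map (fun c => if c = '\\' then '/' else c))).filter (· ≠ [])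
  -- return '/' + '/'.join(segments)
  String.ofList ('/' :: joinS segs)

-- ===== PRECONDITION & SPEC =====
def Spec_normalize_remote_path (path : String) (out : String) : Prop := out = normalize_remote_path_alt path
instance (path : String) (out : String) : Decidable (Spec_normalize_remote_path path out) := by unfold Spec_normalize_remote_path; infer_instance

-- ===== CLAIM (what is proved, stated in full; the proofs are below) =====
def Claim_equal_normalize_remote_path : Prop := ∀ (path : String), Dom_normalize_remote_path path → Spec_normalize_remote_path path (normalize_remote_path path)

-- ===== LEMMAS AND PROOFS =====

-- the slash-run-collapsing normal form A's while-loop converges to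
def squeeze : List Char → List Char
  | [] => []
  | [c] => [c]
  | a :: b :: t => if a = '/' ∧ b = '/' then squeeze ('/' :: t) else a :: squeeze (b :: t)
termination_by l => l.length

theorem squeeze_dd (t : List Char) : squeeze ('/' :: '/' :: t) = squeeze ('/' :: t) := by
  simp only [squeeze, and_self, if_pos]

theorem squeeze_ndd (a b : Char) (t : List Char) (h : ¬(a = '/' ∧ b = '/')) :
    squeeze (a :: b :: t) = a :: squeeze (b :: t) := by
  simp only [squeeze, if_neg h]

theorem sq_rep (l : List Char) (c : Char) : squeeze (c :: repDD l) = squeeze (c :: l) := by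
  match l with
  | [] => rfl
  | [x] => rfl
  | a :: b :: t =>
    by_cases hab : a = '/' ∧ b = '/'
    · obtain ⟨ha, hb⟩ := hab; subst ha; subst hb
      simp only [repDD, and_self, if_pos]
      by_cases hc : c = '/'
      · subst hc
        rw [squeeze_dd, squeeze_dd, squeeze_dd, sq_rep t '/']
      · rw [squeeze_ndd c '/' (repDD t) (by simp [hc]), squeeze_ndd c '/' ('/' :: t) (by simp [hc]),
          sq_rep t '/', squeeze_dd]
    · simp only [repDD, if_neg hab]
      by_cases hca : c = '/' ∧ a = '/'
      · obtain ⟨hc, ha⟩ := hca; subst hc; subst ha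
        have hb : b ≠ '/' := fun h => hab ⟨rfl, h⟩
        rw [squeeze_dd, squeeze_dd, sq_rep (b :: t) '/']
      · rw [squeeze_ndd c a _ hca, squeeze_ndd c a _ hca, sq_rep (b :: t) a]
termination_by l.length

theorem sq_rep' (l : List Char) : squeeze (repDD l) = squeeze l := by
  match l with
  | [] => rfl
  | [x] => rfl
  | a :: b :: t =>
    by_cases hab : a = '/' ∧ b = '/'
    · obtain ⟨ha, hb⟩ := hab; subst ha; subst hb
      simp only [repDD, and_self, if_pos]
      rw [sq_rep t '/', squeeze_dd]
    · simp only [repDD, if_neg hab]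
      rw [sq_rep (b :: t) a]

theorem sq_noDD (l : List Char) (h : hasDD l = false) : squeeze l = l := by
  match l with
  | [] => simp [squeeze]
  | [x] => simp [squeeze]
  | a :: b :: t =>
    simp only [hasDD, Bool.or_eq_false_iff, Bool.and_eq_false_iff] at h
    obtain ⟨h1, h2⟩ := h
    have hab : ¬(a = '/' ∧ b = '/') := by
      rcases h1 with h1 | h1 <;> simp at h1 <;> tauto
    rw [squeeze_ndd a b t hab, sq_noDD (b :: t) h2]
termination_by l.length

theorem loopRep_eq_squeeze (l : List Char) : loopRep l = squeeze l := by
  rw [loopRep]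
  by_cases h : hasDD l
  · rw [if_pos h, loopRep_eq_squeeze (repDD l), sq_rep' l]
  · rw [if_neg h, sq_noDD l (by simpa using h)]
termination_by l.length
decreasing_by exact repDD_length_lt l (by assumption)

def segsOf (l : List Char) : List (List Char) := (splitSlash l).filter (· ≠ [])

theorem splitSlash_ne_nil (l : List Char) : splitSlash l ≠ [] := by
  match l with
  | [] => simp [splitSlash]
  | c :: t =>
    cases h : splitSlash t with
    | nil => simp [splitSlash, h]
    | cons s rest =>
      simp only [splitSlash, h]
      split <;> simp

theorem segsOf_slash_cons (t : List Char) : segsOf ('/' :: t) = segsOf t := by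
  unfold segsOf
  cases h : splitSlash t with
  | nil => exact absurd h (splitSlash_ne_nil t)
  | cons s rest => simp [splitSlash, h]

theorem segsOf_cons_ne (c : Char) (t : List Char) (hc : c ≠ '/') :
    ∃ s rest, splitSlash t = s :: rest ∧ splitSlash (c :: t) = (c :: s) :: rest := by
  cases h : splitSlash t with
  | nil => exact absurd h (splitSlash_ne_nil t)
  | cons s rest => exact ⟨s, rest, rfl, by simp [splitSlash, h, hc]⟩

theorem segsOf_nil_all_slash (l : List Char) (h : segsOf l = []) (hne : l ≠ []) :
    l.getLast? = some '/' := by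
  match l with
  | [] => exact absurd rfl hne
  | [c] =>
    by_cases hc : c = '/'
    · subst hc; rfl
    · simp [segsOf, splitSlash, hc] at h
  | a :: b :: t =>
    rw [List.getLast?_cons_cons]
    by_cases ha : a = '/'
    · subst ha
      rw [segsOf_slash_cons] at h
      exact segsOf_nil_all_slash (b :: t) h (by simp)
    · obtain ⟨s, rest, _, h2⟩ := segsOf_cons_ne a (b :: t) ha
      simp [segsOf, h2] at h
termination_by l.length

theorem splitSlash_no_slash (l : List Char) (s : List Char) (hs : s ∈ splitSlash l) : '/' ∉ s := by
  match l with
  | [] => simp [splitSlash] at hs; simp [hs]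
  | c :: t =>
    cases h : splitSlash t with
    | nil => exact absurd h (splitSlash_ne_nil t)
    | cons s0 rest =>
      by_cases hc : c = '/'
      · simp only [splitSlash, h, if_pos hc] at hs
        rcases List.mem_cons.mp hs with hs | hs
        · simp [hs]
        · exact splitSlash_no_slash t s (by rw [h]; exact hs)
      · simp only [splitSlash, h, if_neg hc] at hs
        rcases List.mem_cons.mp hs with hs | hs
        · subst hs
          intro hmem
          rcases List.mem_cons.mp hmem with h1 | h1
          · exact hc h1.symm
          · exact splitSlash_no_slash t s0 (by rw [h]; exact List.mem_cons_self ..) h1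
        · exact splitSlash_no_slash t s (by rw [h]; exact List.mem_cons_of_mem _ hs)
termination_by l.length

theorem joinS_cons_cons (a : Char) (s : List Char) (F : List (List Char)) :
    joinS ((a :: s) :: F) = a :: joinS (s :: F) := by
  cases F <;> simp [joinS]

-- the structural characterisation of squeeze in terms of segments
theorem squeeze_char (l : List Char) :
    squeeze l = (if l.head? = some '/' then ['/'] else []) ++ joinS (segsOf l)
      ++ (if segsOf l ≠ [] ∧ l.getLast? = some '/' then ['/'] else []) := by
  match l with
  | [] => simp [squeeze, segsOf, splitSlash, joinS]
  | [c] =>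
    by_cases hc : c = '/'
    · subst hc; simp [squeeze, segsOf, splitSlash, joinS]
    · simp [squeeze, segsOf, splitSlash, joinS, hc]
  | a :: b :: t =>
    by_cases hab : a = '/' ∧ b = '/'
    · obtain ⟨ha, hb⟩ := hab; subst ha; subst hb
      rw [squeeze_dd, squeeze_char ('/' :: t), List.getLast?_cons_cons,
        segsOf_slash_cons ('/' :: t), segsOf_slash_cons t]
      simp
    · rw [squeeze_ndd a b t hab, squeeze_char (b :: t), List.getLast?_cons_cons]
      by_cases ha : a = '/'
      · subst ha
        have hb : b ≠ '/' := fun h => hab ⟨rfl, h⟩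
        rw [segsOf_slash_cons (b :: t)]
        simp [hb]
      · obtain ⟨s, rest, hsp, hsp2⟩ := segsOf_cons_ne a (b :: t) ha
        have hsegl : segsOf (a :: b :: t) = (a :: s) :: rest.filter (· ≠ []) := by
          simp [segsOf, hsp2]
        by_cases hb : b = '/'
        · subst hb
          have hs0 : s = [] ∧ rest = splitSlash t := by
            cases ht : splitSlash t with
            | nil => exact absurd ht (splitSlash_ne_nil t)
            | cons u ur =>
              rw [splitSlash, ht] at hsp
              simp at hsp
              exact ⟨hsp.1, hsp.2.symm⟩
          obtain ⟨hs, hrest⟩ := hs0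
          subst hs
          have hsegbt : segsOf ('/' :: t) = segsOf t := segsOf_slash_cons t
          have hF : rest.filter (· ≠ []) = segsOf t := by rw [hrest]; rfl
          rw [hsegl, hsegbt, hF]
          by_cases hFt : segsOf t = []
          · have hL : ('/' :: t).getLast? = some '/' := by
              cases t with
              | nil => rfl
              | cons x xs =>
                rw [List.getLast?_cons_cons]
                exact segsOf_nil_all_slash (x :: xs) hFt (by simp)
            simp [hFt, joinS, hL, ha]
          · rw [joinS_cons_cons a [] (segsOf t)]
            have hjoin : joinS ([] :: segsOf t) = '/' :: joinS (segsOf t) := by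
              cases hsg : segsOf t with
              | nil => exact absurd hsg hFt
              | cons u ur => simp [joinS]
            simp [hjoin, hFt, ha]
        · obtain ⟨s0, rest0, _, hsp20⟩ := segsOf_cons_ne b t hb
          have he : s = b :: s0 ∧ rest = rest0 := by
            have h2 := hsp.symm.trans hsp20
            simpa using h2
          obtain ⟨he1, he2⟩ := he
          subst he1; subst he2
          have hsegbt : segsOf (b :: t) = (b :: s0) :: rest.filter (· ≠ []) := by
            simp [segsOf, hsp20]
          rw [hsegl, hsegbt, joinS_cons_cons a (b :: s0) (rest.filter (· ≠ []))]
          simp [hb, ha]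

theorem joinS_rev (S : List (List Char)) (hne : S ≠ [])
    (h : ∀ s ∈ S, s ≠ [] ∧ '/' ∉ s) :
    ∃ c cs, (joinS S).reverse = c :: cs ∧ c ≠ '/' := by
  match S with
  | [] => exact absurd rfl hne
  | [s] =>
    obtain ⟨hs, hslash⟩ := h s (by simp)
    cases hr : s.reverse with
    | nil => exact absurd (by simpa using hr) hs
    | cons c cs =>
      have hcmem : c ∈ s := List.mem_reverse.mp (hr ▸ List.mem_cons_self ..)
      exact ⟨c, cs, by simp [joinS, hr], fun hc => hslash (hc ▸ hcmem)⟩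
  | s :: s2 :: S' =>
    obtain ⟨c, cs, hrev, hc⟩ := joinS_rev (s2 :: S') (by simp)
      (fun x hx => h x (List.mem_cons_of_mem _ hx))
    refine ⟨c, cs ++ '/' :: s.reverse, ?_, hc⟩
    have hj : joinS (s :: s2 :: S') = s ++ '/' :: joinS (s2 :: S') := by simp [joinS]
    rw [hj, List.reverse_append, List.reverse_cons, hrev]
    simp

theorem segsOf_all (m : List Char) : ∀ s ∈ segsOf m, s ≠ [] ∧ '/' ∉ s := by
  intro s hs
  unfold segsOf at hs
  rw [List.mem_filter] at hs
  exact ⟨by simpa using hs.2, splitSlash_no_slash m s hs.1⟩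

-- A's pipeline after the replace/startswith steps, characterised by B's segments
theorem key (m : List Char) (hm : m ≠ []) :
    loopRep (if m.head? = some '/' then m else '/' :: m)
      = '/' :: (joinS (segsOf m)
          ++ (if segsOf m ≠ [] ∧ m.getLast? = some '/' then ['/'] else [])) := by
  by_cases hh : m.head? = some '/'
  · rw [if_pos hh, loopRep_eq_squeeze, squeeze_char m, if_pos hh]
    simp
  · rw [if_neg hh, loopRep_eq_squeeze, squeeze_char ('/' :: m), segsOf_slash_cons m]
    have hlast : ('/' :: m).getLast? = m.getLast? := by
      cases m with
      | nil => exact absurd rfl hm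
      | cons x xs => exact List.getLast?_cons_cons
    rw [hlast]
    simp

-- ===== VERDICT (by name: the statement is the Claim_ definition above) =====
theorem normalize_remote_path_spec : Claim_equal_normalize_remote_path := by
  unfold Claim_equal_normalize_remote_path Spec_normalize_remote_path
  intro path _
  by_cases hp : path = ""
  · subst hp; rfl
  · simp only [normalize_remote_path, normalize_remote_path_alt, if_neg hp]
    have hmne : (path.toList.map (fun c => if c = '\\' then '/' else c)) ≠ [] := by
      intro h0
      rw [List.map_eq_nil_iff] at h0
      exact hp (by cases path; simp_all)
    set m := path.toList.map (fun c => if c = '\\' then '/' else c) with hmdef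
    rw [key m hmne]
    rw [show List.filter (fun x => decide (x ≠ [])) (splitSlash m) = segsOf m from rfl]
    by_cases hseg : segsOf m = []
    · simp [hseg, joinS]
    · obtain ⟨c, cs, hrev, hc⟩ := joinS_rev (segsOf m) hseg (segsOf_all m)
      set J := joinS (segsOf m) with hJ
      by_cases hlast : m.getLast? = some '/'
      · rw [if_pos (show segsOf m ≠ [] ∧ m.getLast? = some '/' from ⟨hseg, hlast⟩)]
        have hr : ('/' :: (J ++ ['/'])) = ('/' :: J) ++ ['/'] := by simp
        have hcond : 1 < ('/' :: (J ++ ['/'])).length ∧ ('/' :: (J ++ ['/'])).getLast? = some '/' := by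
          constructor
          · simp
          · rw [hr, List.getLast?_concat]
        rw [if_pos hcond]
        have hrevr : ('/' :: (J ++ ['/'])).reverse = '/' :: c :: (cs ++ ['/']) := by
          rw [hr, List.reverse_append]
          simp [hrev]
        rw [hrevr]
        have hdrop : List.dropWhile (· = '/') ('/' :: c :: (cs ++ ['/'])) = c :: (cs ++ ['/']) := by
          simp [List.dropWhile, hc]
        rw [hdrop]
        have hback : c :: (cs ++ ['/']) = ('/' :: J).reverse := by
          simp [hrev]
        rw [hback, List.reverse_reverse]
      · rw [if_neg (show ¬(segsOf m ≠ [] ∧ m.getLast? = some '/') from fun hco => hlast hco.2)]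
        have hgl : ('/' :: (J ++ [])).getLast? = some c := by
          rw [List.getLast?_eq_head?_reverse, List.append_nil, List.reverse_cons, hrev]
          simp
        rw [if_neg (fun hco => hc (by
          rw [hgl] at hco
          exact Option.some.inj hco.2))]
        simp
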